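-- pv_equiv track=rewrite | github.com/lucianomartinsjr/agentic-project-final | src/services/cpf_service.py | format_cpf_input
-- ===== SOURCE A (Python) =====
-- def format_cpf_input(value: str) -> str:
--     """Máscara simples: mantém só dígitos, limita a 11 e formata como XXX.XXX.XXX-XX."""
--     digits = "".join(ch for ch in str(value or "") if ch.isdigit())[:11]
--     if not digits:
--         return ""
--
--     part1 = digits[:3]
--     part2 = digits[3:6]
--     part3 = digits[6:9]
--     part4 = digits[9:11]
--
--     out = part1
--     if len(digits) > 3:
--         out += "." + part2
--     if len(digits) > 6:
--         out += "." + part3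
--     if len(digits) > 9:
--         out += "-" + part4
--     return out
-- ===== SOURCE B (Python) =====
-- def format_cpf_input(value: str) -> str:
--     digits = "".join(ch for ch in str(value or "") if ch.isdigit())[:11]
--     out = []
--     for i, ch in enumerate(digits):
--         if i == 3 or i == 6:
--             out.append(".")
--         elif i == 9:
--             out.append("-")
--         out.append(ch)
--     return "".join(out)
-- ===== Notes on version B (the rewrite author's own statement) =====
-- stated objective: simpler
-- what changed: Replaces the four fixed slices plus three length-guarded concatenations with a single enumerate loop that inserts a dot before digit positions three and six and a dash before position nine while appending each digit.
import Mathlib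
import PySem

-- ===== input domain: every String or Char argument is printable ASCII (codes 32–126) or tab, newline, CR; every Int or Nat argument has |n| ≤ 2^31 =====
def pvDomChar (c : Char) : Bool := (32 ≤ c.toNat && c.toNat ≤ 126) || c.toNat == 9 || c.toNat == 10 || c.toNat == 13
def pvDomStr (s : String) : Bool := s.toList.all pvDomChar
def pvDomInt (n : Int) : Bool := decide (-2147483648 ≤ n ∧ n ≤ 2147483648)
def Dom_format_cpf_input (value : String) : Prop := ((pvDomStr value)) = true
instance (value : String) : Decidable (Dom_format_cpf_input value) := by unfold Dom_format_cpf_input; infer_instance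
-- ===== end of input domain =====

-- B replaces the slice-and-guard formatting with one enumerate pass inserting separators positionally.
-- ===== PORT A =====
def format_cpf_input (value : String) : String :=
  let digits := PySem.List.slice (value.toList.filter PySem.Chars.isdigit) none (some 11)
  if digits = [] then "" else
  let part1 := PySem.List.slice digits none (some 3)
  let part2 := PySem.List.slice digits (some 3) (some 6)
  let part3 := PySem.List.slice digits (some 6) (some 9)
  let part4 := PySem.List.slice digits (some 9) (some 11)
  let out := part1
  let out := if digits.length > 3 then out ++ '.' :: part2 else out
  let out := if digits.length > 6 then out ++ '.' :: part3 else out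
  let out := if digits.length > 9 then out ++ '-' :: part4 else out
  String.mk out

-- ===== PORT B =====
def format_cpf_input_alt (value : String) : String :=
  let digits := PySem.List.slice (value.toList.filter PySem.Chars.isdigit) none (some 11)
  String.mk ((PySem.List.enumerate digits 0).foldl
    (fun acc p =>
      (acc ++ (if p.1 = 3 ∨ p.1 = 6 then ['.'] else if p.1 = 9 then ['-'] else [])) ++ [p.2])
    [])

-- ===== PRECONDITION & SPEC =====
def Spec_format_cpf_input (value : String) (out : String) : Prop := out = format_cpf_input_alt value
instance (value : String) (out : String) : Decidable (Spec_format_cpf_input value out) := by unfold Spec_format_cpf_input; infer_instance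

-- ===== CLAIM (what is proved, stated in full; the proofs are below) =====
def Claim_equal_format_cpf_input : Prop := ∀ (value : String), Dom_format_cpf_input value → Spec_format_cpf_input value (format_cpf_input value)

-- ===== LEMMAS AND PROOFS =====

-- both ports agree as soon as the digit list has at most 11 elements
theorem cpf_core (d : List Char) (h : d.length ≤ 11) :
    (if d = [] then "" else
      let part1 := PySem.List.slice d none (some 3)
      let part2 := PySem.List.slice d (some 3) (some 6)
      let part3 := PySem.List.slice d (some 6) (some 9)
      let part4 := PySem.List.slice d (some 9) (some 11)
      let out := part1
      let out := if d.length > 3 then out ++ '.' :: part2 else out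
      let out := if d.length > 6 then out ++ '.' :: part3 else out
      let out := if d.length > 9 then out ++ '-' :: part4 else out
      String.mk out)
    = String.mk ((PySem.List.enumerate d 0).foldl
        (fun acc p =>
          (acc ++ (if p.1 = 3 ∨ p.1 = 6 then ['.'] else if p.1 = 9 then ['-'] else [])) ++ [p.2])
        []) := by
  match d with
  | [] => rfl
  | [a] =>
      norm_num [PySem.List.slice, PySem.List.enumerate, Int.toNat] <;> (intro hc; simp at hc)
  | [a,b] =>
      norm_num [PySem.List.slice, PySem.List.enumerate, Int.toNat] <;> (intro hc; simp at hc)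
  | [a,b,c] =>
      norm_num [PySem.List.slice, PySem.List.enumerate, Int.toNat] <;> (intro hc; simp at hc)
  | [a,b,c,e] =>
      norm_num [PySem.List.slice, PySem.List.enumerate, Int.toNat] <;> (intro hc; simp at hc)
  | [a,b,c,e,f] =>
      norm_num [PySem.List.slice, PySem.List.enumerate, Int.toNat] <;> (intro hc; simp at hc)
  | [a,b,c,e,f,g] =>
      norm_num [PySem.List.slice, PySem.List.enumerate, Int.toNat] <;> (intro hc; simp at hc)
  | [a,b,c,e,f,g,i] =>
      norm_num [PySem.List.slice, PySem.List.enumerate, Int.toNat] <;> (intro hc; simp at hc)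
  | [a,b,c,e,f,g,i,j] =>
      norm_num [PySem.List.slice, PySem.List.enumerate, Int.toNat] <;> (intro hc; simp at hc)
  | [a,b,c,e,f,g,i,j,k] =>
      norm_num [PySem.List.slice, PySem.List.enumerate, Int.toNat] <;> (intro hc; simp at hc)
  | [a,b,c,e,f,g,i,j,k,l] =>
      norm_num [PySem.List.slice, PySem.List.enumerate, Int.toNat] <;> (intro hc; simp at hc)
  | [a,b,c,e,f,g,i,j,k,l,m] =>
      norm_num [PySem.List.slice, PySem.List.enumerate, Int.toNat] <;> (intro hc; simp at hc)
  | a::b::c::e::f::g::i::j::k::l::m::n::rest => simp at h; omega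

-- ===== VERDICT (by name: the statement is the Claim_ definition above) =====
theorem format_cpf_input_spec : Claim_equal_format_cpf_input := by
  intro value _
  show format_cpf_input value = format_cpf_input_alt value
  unfold format_cpf_input format_cpf_input_alt
  have h : (PySem.List.slice (value.toList.filter PySem.Chars.isdigit) none (some 11)).length ≤ 11 := by
    rw [PySem.List.slice_to _ (by norm_num : (0:Int) ≤ 11)]
    simp
  exact cpf_core _ h
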